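-- pv_equiv track=rewrite | github.com/Herotank1234/AdventOfCode | 2020/q17.py | part1
-- ===== SOURCE A (Python) =====
-- import itertools
-- import copy
--
-- def part1(state):
--   currState = copy.deepcopy(state)
--   iterations = 6
--   for _ in range(0, iterations):
--     nextState = set()
--     checked = set()
--     for (x, y, z) in currState:
--       for direction in itertools.product([-1, 0, 1], repeat=3):
--         currX, currY, currZ = x + direction[0], y + direction[1], z + direction[2]
--         if (currX, currY, currZ) in checked: continue
--         neighbours = len([(a, b, c) for (a, b, c) in currState
--           if abs(currX - a) <= 1 and abs(currY - b) <= 1 and abs(currZ - c) <= 1])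
--         if (currX, currY, currZ) in currState:
--           neighbours -= 1
--           if neighbours == 2 or neighbours == 3:
--             nextState.add((currX, currY, currZ))
--         else:
--           if neighbours == 3:
--             nextState.add((currX, currY, currZ))
--         checked.add((currX, currY, currZ))
--     currState = nextState
--
--   return len(currState)
-- ===== SOURCE B (Python) =====
-- def part1(state):
--   active = set(state)
--   for _ in range(6):
--     counts = {}
--     for (x, y, z) in active:
--       for dx in (-1, 0, 1):
--         for dy in (-1, 0, 1):
--           for dz in (-1, 0, 1):
--             if dx == 0 and dy == 0 and dz == 0:
--               continue
--             k = (x + dx, y + dy, z + dz)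
--             counts[k] = counts.get(k, 0) + 1
--     active = {c for c, n in counts.items() if n == 3 or (n == 2 and c in active)}
--   return len(active)
-- ===== Notes on version B (the rewrite author's own statement) =====
-- stated objective: faster
-- what changed: A recomputes each candidate cell's neighbour count by rescanning the whole active set (with a 'checked' set to skip repeats); B makes one pass over the active cells, accumulating neighbour counts in a dict over the 26 offsets, then applies the birth/survival rules to the counted cells.
import Mathlib
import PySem

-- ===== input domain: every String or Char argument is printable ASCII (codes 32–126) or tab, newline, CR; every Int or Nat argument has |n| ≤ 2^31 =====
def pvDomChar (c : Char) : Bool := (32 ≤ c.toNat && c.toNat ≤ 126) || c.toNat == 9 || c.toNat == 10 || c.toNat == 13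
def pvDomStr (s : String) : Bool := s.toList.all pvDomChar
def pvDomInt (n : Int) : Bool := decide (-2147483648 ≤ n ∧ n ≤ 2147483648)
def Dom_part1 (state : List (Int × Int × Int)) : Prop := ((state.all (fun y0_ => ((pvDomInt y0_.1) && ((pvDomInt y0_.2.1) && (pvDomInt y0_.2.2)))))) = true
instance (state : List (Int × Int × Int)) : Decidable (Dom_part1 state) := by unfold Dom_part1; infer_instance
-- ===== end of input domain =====

-- B replaces A's per-candidate rescan of the whole state (a full scan per candidate cell,
-- per generation) by one pass that accumulates neighbour counts in a dict over the 26
-- offsets and then applies the rules to the counted cells; objective: faster.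

-- ===== PORT A =====
def pvDirs : List (Int × Int × Int) :=
  ([-1, 0, 1] : List Int).flatMap (fun a =>
    ([-1, 0, 1] : List Int).flatMap (fun b =>
      ([-1, 0, 1] : List Int).map (fun c => (a, b, c))))

def pvNear (c q : Int × Int × Int) : Bool :=
  decide (|c.1 - q.1| ≤ 1 ∧ |c.2.1 - q.2.1| ≤ 1 ∧ |c.2.2 - q.2.2| ≤ 1)

def pvStepA (curr : List (Int × Int × Int)) : List (Int × Int × Int) :=
  (curr.foldl (fun (st : List (Int × Int × Int) × List (Int × Int × Int)) p =>
    pvDirs.foldl (fun st d =>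
      let c := (p.1 + d.1, p.2.1 + d.2.1, p.2.2 + d.2.2)
      if PySem.Set.contains st.2 c then st
      else
        let neighbours : Int := ((curr.filter (fun q => pvNear c q)).length : Int)
        let next :=
          if PySem.Set.contains curr c then
            if neighbours - 1 = 2 ∨ neighbours - 1 = 3 then PySem.Set.add st.1 c else st.1
          else
            if neighbours = 3 then PySem.Set.add st.1 c else st.1
        (next, PySem.Set.add st.2 c)) st)
    (PySem.Set.empty, PySem.Set.empty)).1

def part1 (state : List (Int × Int × Int)) : Int :=
  (((List.range 6).foldl (fun currState _ => pvStepA currState) state).length : Int)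

-- ===== PORT B =====
def pvStepB (active : List (Int × Int × Int)) : List (Int × Int × Int) :=
  let counts : PySem.Dict (Int × Int × Int) Int :=
    active.foldl (fun d p =>
      ([-1, 0, 1] : List Int).foldl (fun d dx =>
        ([-1, 0, 1] : List Int).foldl (fun d dy =>
          ([-1, 0, 1] : List Int).foldl (fun d dz =>
            if dx = 0 ∧ dy = 0 ∧ dz = 0 then d
            else
              let k := (p.1 + dx, p.2.1 + dy, p.2.2 + dz)
              d.insert k (d.getD k 0 + 1)) d) d) d) PySem.Dict.empty
  counts.items.foldl (fun s kn =>
    if kn.2 = 3 ∨ (kn.2 = 2 ∧ PySem.Set.contains active kn.1) then PySem.Set.add s kn.1 else s)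
    PySem.Set.empty

def part1_alt (state : List (Int × Int × Int)) : Int :=
  (((List.range 6).foldl (fun active _ => pvStepB active) (PySem.Set.ofList state)).length : Int)

-- ===== PRECONDITION & SPEC =====
-- The parameter is a Python set of cells; Pre_ states the corresponding list invariant
-- (distinct elements). It excludes only lists with duplicate cells, on which A's
-- list-comprehension neighbour count double-counts the repeated entries of the first
-- generation while B deduplicates the input.
def Pre_part1 (state : List (Int × Int × Int)) : Prop := state.Nodup
instance (state : List (Int × Int × Int)) : Decidable (Pre_part1 state) := by
  unfold Pre_part1; infer_instance

def pvWitness_part1 : (List (Int × Int × Int)) := [(0, 0, 0), (1, 0, 0), (2, 0, 0)]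

def Spec_part1 (state : List (Int × Int × Int)) (out : Int) : Prop := out = part1_alt state
instance (state : List (Int × Int × Int)) (out : Int) : Decidable (Spec_part1 state out) := by
  unfold Spec_part1; infer_instance

-- ===== CLAIM (what is proved, stated in full; the proofs are below) =====
def Claim_equal_part1 : Prop := ∀ (state : List (Int × Int × Int)), Dom_part1 state → Pre_part1 state → Spec_part1 state (part1 state)

-- ===== LEMMAS AND PROOFS =====
-- pvNbr curr c = number of active proper neighbours of c; pvRule is the survival/birth rule.
def pvShift (p d : Int × Int × Int) : Int × Int × Int := (p.1 + d.1, p.2.1 + d.2.1, p.2.2 + d.2.2)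

def pvNbr (curr : List (Int × Int × Int)) (c : Int × Int × Int) : Nat :=
  curr.countP (fun q => decide (q ≠ c) && pvNear c q)

def pvRule (curr : List (Int × Int × Int)) (c : Int × Int × Int) : Prop :=
  pvNbr curr c = 3 ∨ (pvNbr curr c = 2 ∧ c ∈ curr)

lemma mem_tri (x : Int) : x ∈ ([-1, 0, 1] : List Int) ↔ |x| ≤ 1 := by
  simp [abs_le]; omega

lemma mem_pvDirs (d : Int × Int × Int) :
    d ∈ pvDirs ↔ |d.1| ≤ 1 ∧ |d.2.1| ≤ 1 ∧ |d.2.2| ≤ 1 := by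
  obtain ⟨a, b, c⟩ := d
  simp only [pvDirs, List.mem_flatMap, List.mem_map]
  constructor
  · rintro ⟨x, hx, y, hy, z, hz, h⟩
    obtain ⟨rfl, rfl, rfl⟩ : x = a ∧ y = b ∧ z = c := by
      simpa [Prod.ext_iff] using h
    exact ⟨(mem_tri x).1 hx, (mem_tri y).1 hy, (mem_tri z).1 hz⟩
  · rintro ⟨ha, hb, hc⟩
    exact ⟨a, (mem_tri a).2 ha, b, (mem_tri b).2 hb, c, (mem_tri c).2 hc, rfl⟩

lemma pvNear_self (c : Int × Int × Int) : pvNear c c = true := by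
  simp [pvNear]

lemma countP_near (curr : List (Int × Int × Int)) (c : Int × Int × Int) (h : curr.Nodup) :
    curr.countP (fun q => pvNear c q) = pvNbr curr c + (if c ∈ curr then 1 else 0) := by
  induction curr with
  | nil => simp [pvNbr]
  | cons p t ih =>
    rw [List.nodup_cons] at h
    obtain ⟨hp, ht⟩ := h
    have ihh := ih ht
    by_cases hpc : p = c
    · subst hpc
      simp [List.countP_cons, pvNbr, pvNear_self, hp] at ihh ⊢
      omega
    · have hcm : (c ∈ p :: t) ↔ c ∈ t := by simp [Ne.symm hpc]
      by_cases hn : pvNear c p = true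
      · simp [List.countP_cons, pvNbr, hn, hpc, hcm] at ihh ⊢
        omega
      · simp [List.countP_cons, pvNbr, hn, hpc, hcm] at ihh ⊢
        omega

def pvG (curr : List (Int × Int × Int))
    (st : List (Int × Int × Int) × List (Int × Int × Int)) (c : Int × Int × Int) :
    List (Int × Int × Int) × List (Int × Int × Int) :=
  if PySem.Set.contains st.2 c then st
  else
    let neighbours : Int := ((curr.filter (fun q => pvNear c q)).length : Int)
    let next :=
      if PySem.Set.contains curr c then
        if neighbours - 1 = 2 ∨ neighbours - 1 = 3 then PySem.Set.add st.1 c else st.1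
      else
        if neighbours = 3 then PySem.Set.add st.1 c else st.1
    (next, PySem.Set.add st.2 c)

def pvCands (curr : List (Int × Int × Int)) : List (Int × Int × Int) :=
  curr.flatMap (fun p => pvDirs.map (pvShift p))

lemma stepA_eq_foldG (curr : List (Int × Int × Int)) :
    pvStepA curr = ((pvCands curr).foldl (pvG curr) (PySem.Set.empty, PySem.Set.empty)).1 := by
  rw [pvStepA, pvCands, List.foldl_flatMap]
  have h : ∀ (st : List (Int × Int × Int) × List (Int × Int × Int)) (p : Int × Int × Int),
      List.foldl (pvG curr) st (pvDirs.map (pvShift p)) =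
      pvDirs.foldl (fun st d =>
        let c := (p.1 + d.1, p.2.1 + d.2.1, p.2.2 + d.2.2)
        if PySem.Set.contains st.2 c then st
        else
          let neighbours : Int := ((curr.filter (fun q => pvNear c q)).length : Int)
          let next :=
            if PySem.Set.contains curr c then
              if neighbours - 1 = 2 ∨ neighbours - 1 = 3 then PySem.Set.add st.1 c else st.1
            else
              if neighbours = 3 then PySem.Set.add st.1 c else st.1
          (next, PySem.Set.add st.2 c)) st := by
    intro st p
    rw [List.foldl_map]
    rfl
  simp only [h]

-- the branch condition of A's loop body is exactly pvRule
lemma condA_iff (curr : List (Int × Int × Int)) (c : Int × Int × Int) (h : curr.Nodup) :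
    (if c ∈ curr then
        (((curr.filter (fun q => pvNear c q)).length : Int) - 1 = 2 ∨
         ((curr.filter (fun q => pvNear c q)).length : Int) - 1 = 3)
      else ((curr.filter (fun q => pvNear c q)).length : Int) = 3) ↔ pvRule curr c := by
  have hcount := countP_near curr c h
  rw [List.countP_eq_length_filter] at hcount
  by_cases hm : c ∈ curr
  · simp only [pvRule, hm, if_true, and_true, eq_self_iff_true] at hcount ⊢
    omega
  · simp only [pvRule, hm, if_false, and_false, or_false] at hcount ⊢
    omega

lemma foldG_inv (curr : List (Int × Int × Int)) (h : curr.Nodup) :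
    ∀ (l : List (Int × Int × Int)) (st : List (Int × Int × Int) × List (Int × Int × Int)),
      st.2.Nodup → st.1.Nodup → (∀ c, c ∈ st.1 ↔ (c ∈ st.2 ∧ pvRule curr c)) →
      ((l.foldl (pvG curr) st).2.Nodup ∧ (l.foldl (pvG curr) st).1.Nodup ∧
        (∀ c, c ∈ (l.foldl (pvG curr) st).1 ↔ ((c ∈ st.2 ∨ c ∈ l) ∧ pvRule curr c))) := by
  intro l
  induction l with
  | nil => intro st h2 h1 hm; exact ⟨h2, h1, fun c => by simpa using hm c⟩
  | cons a l ih =>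
    intro st h2 h1 hm
    rw [List.foldl_cons]
    by_cases hc : a ∈ st.2
    · have hG : pvG curr st a = st := by
        unfold pvG
        rw [if_pos ((PySem.Set.contains_iff st.2 a).2 hc)]
      rw [hG]
      obtain ⟨r2, r1, rm⟩ := ih st h2 h1 hm
      refine ⟨r2, r1, fun c => (rm c).trans ?_⟩
      constructor
      · rintro ⟨hin, hr⟩
        exact ⟨hin.imp id (List.mem_cons_of_mem a), hr⟩
      · rintro ⟨hin, hr⟩
        refine ⟨?_, hr⟩
        rcases hin with hin | hin
        · exact Or.inl hin
        · rcases List.mem_cons.1 hin with rfl | hin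
          · exact Or.inl hc
          · exact Or.inr hin
    · have ha1 : a ∉ st.1 := fun hin => hc ((hm a).1 hin).1
      have hadd2 : PySem.Set.add st.2 a = st.2 ++ [a] := by
        simp [PySem.Set.add, PySem.Set.contains_iff, hc]
      have hadd1 : PySem.Set.add st.1 a = st.1 ++ [a] := by
        simp [PySem.Set.add, PySem.Set.contains_iff, ha1]
      have hcond := condA_iff curr a h
      have h2' : (st.2 ++ [a]).Nodup := by
        rw [← List.concat_eq_append]
        exact List.Nodup.concat hc h2
      by_cases hr : pvRule curr a
      · have hG : pvG curr st a = (st.1 ++ [a], st.2 ++ [a]) := by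
          unfold pvG
          rw [if_neg (by simp [PySem.Set.contains_iff, hc])]
          simp only [PySem.Set.contains_iff, hadd2, hadd1]
          by_cases hm' : a ∈ curr
          · rw [if_pos hm'] at hcond
            rw [if_pos hm', if_pos (hcond.2 hr)]
          · rw [if_neg hm'] at hcond
            rw [if_neg hm', if_pos (hcond.2 hr)]
        rw [hG]
        have h1' : (st.1 ++ [a]).Nodup := by
          rw [← List.concat_eq_append]
          exact List.Nodup.concat ha1 h1
        have hm1 : ∀ c, c ∈ st.1 ++ [a] ↔ (c ∈ st.2 ++ [a] ∧ pvRule curr c) := by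
          intro c
          simp only [List.mem_append, List.mem_singleton]
          constructor
          · rintro (hin | rfl)
            · exact ⟨Or.inl ((hm c).1 hin).1, ((hm c).1 hin).2⟩
            · exact ⟨Or.inr rfl, hr⟩
          · rintro ⟨hin | rfl, hrc⟩
            · exact Or.inl ((hm c).2 ⟨hin, hrc⟩)
            · exact Or.inr rfl
        obtain ⟨r2, r1, rm⟩ := ih (st.1 ++ [a], st.2 ++ [a]) h2' h1' hm1
        refine ⟨r2, r1, fun c => (rm c).trans ?_⟩
        simp only [List.mem_append, List.mem_singleton, List.mem_cons]
        tauto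
      · have hG : pvG curr st a = (st.1, st.2 ++ [a]) := by
          unfold pvG
          rw [if_neg (by simp [PySem.Set.contains_iff, hc])]
          simp only [PySem.Set.contains_iff, hadd2, hadd1]
          by_cases hm' : a ∈ curr
          · rw [if_pos hm'] at hcond
            rw [if_pos hm', if_neg (fun hx => hr (hcond.1 hx))]
          · rw [if_neg hm'] at hcond
            rw [if_neg hm', if_neg (fun hx => hr (hcond.1 hx))]
        rw [hG]
        have hm1 : ∀ c, c ∈ st.1 ↔ (c ∈ st.2 ++ [a] ∧ pvRule curr c) := by
          intro c
          simp only [List.mem_append, List.mem_singleton]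
          constructor
          · intro hin
            exact ⟨Or.inl ((hm c).1 hin).1, ((hm c).1 hin).2⟩
          · rintro ⟨hin | rfl, hrc⟩
            · exact (hm c).2 ⟨hin, hrc⟩
            · exact absurd hrc hr
        obtain ⟨r2, r1, rm⟩ := ih (st.1, st.2 ++ [a]) h2' h1 hm1
        refine ⟨r2, r1, fun c => (rm c).trans ?_⟩
        simp only [List.mem_append, List.mem_singleton, List.mem_cons]
        tauto

lemma rule_mem_cands (curr : List (Int × Int × Int)) (c : Int × Int × Int)
    (hr : pvRule curr c) : c ∈ pvCands curr := by
  have hpos : 0 < curr.countP (fun q => decide (q ≠ c) && pvNear c q) := by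
    rcases hr with h3 | ⟨h2, _⟩ <;> [rw [pvNbr] at h3; rw [pvNbr] at h2] <;> omega
  obtain ⟨q, hq, hqc⟩ := List.countP_pos_iff.1 hpos
  rw [Bool.and_eq_true, decide_eq_true_eq] at hqc
  obtain ⟨hne, hnear⟩ := hqc
  rw [pvNear, decide_eq_true_eq] at hnear
  rw [pvCands, List.mem_flatMap]
  refine ⟨q, hq, ?_⟩
  rw [List.mem_map]
  refine ⟨(c.1 - q.1, c.2.1 - q.2.1, c.2.2 - q.2.2), ?_, ?_⟩
  · rw [mem_pvDirs]
    exact ⟨by simpa [abs_sub_comm] using hnear.1,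
           by simpa [abs_sub_comm] using hnear.2.1,
           by simpa [abs_sub_comm] using hnear.2.2⟩
  · simp [pvShift]

lemma stepA_spec (curr : List (Int × Int × Int)) (h : curr.Nodup) :
    (pvStepA curr).Nodup ∧ ∀ c, c ∈ pvStepA curr ↔ pvRule curr c := by
  rw [stepA_eq_foldG]
  obtain ⟨_, r1, rm⟩ := foldG_inv curr h (pvCands curr) (PySem.Set.empty, PySem.Set.empty)
    List.nodup_nil List.nodup_nil (by simp [PySem.Set.empty])
  refine ⟨r1, fun c => (rm c).trans ?_⟩
  constructor
  · rintro ⟨_, hr⟩; exact hr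
  · intro hr
    exact ⟨Or.inr (rule_mem_cands curr c hr), hr⟩

def pvOffs : List (Int × Int × Int) :=
  pvDirs.filter (fun d => !(d == ((0 : Int), (0 : Int), (0 : Int))))

def pvKeys (active : List (Int × Int × Int)) : List (Int × Int × Int) :=
  active.flatMap (fun p => pvOffs.map (pvShift p))

-- B's neighbour-counting dict, as a single fold over the generated keys
def pvCounts (active : List (Int × Int × Int)) : PySem.Dict (Int × Int × Int) Int :=
  (pvKeys active).foldl (fun d k => d.insert k (d.getD k 0 + 1)) PySem.Dict.empty

lemma stepB_eq_counts (active : List (Int × Int × Int)) :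
    pvStepB active = (pvCounts active).items.foldl (fun s kn =>
      if kn.2 = 3 ∨ (kn.2 = 2 ∧ PySem.Set.contains active kn.1) then PySem.Set.add s kn.1 else s)
      PySem.Set.empty := by
  have h : pvCounts active =
      active.foldl (fun d p =>
        ([-1, 0, 1] : List Int).foldl (fun d dx =>
          ([-1, 0, 1] : List Int).foldl (fun d dy =>
            ([-1, 0, 1] : List Int).foldl (fun d dz =>
              if dx = 0 ∧ dy = 0 ∧ dz = 0 then d
              else
                let k := (p.1 + dx, p.2.1 + dy, p.2.2 + dz)
                d.insert k (d.getD k 0 + 1)) d) d) d) PySem.Dict.empty := by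
    rw [pvCounts, pvKeys, List.foldl_flatMap]
    have hp : ∀ (d : PySem.Dict (Int × Int × Int) Int) (p : Int × Int × Int),
        List.foldl (fun d k => d.insert k (d.getD k 0 + 1)) d (pvOffs.map (pvShift p)) =
        ([-1, 0, 1] : List Int).foldl (fun d dx =>
          ([-1, 0, 1] : List Int).foldl (fun d dy =>
            ([-1, 0, 1] : List Int).foldl (fun d dz =>
              if dx = 0 ∧ dy = 0 ∧ dz = 0 then d
              else
                let k := (p.1 + dx, p.2.1 + dy, p.2.2 + dz)
                d.insert k (d.getD k 0 + 1)) d) d) d := by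
      intro d p
      rw [List.foldl_map, pvOffs, List.foldl_filter, pvDirs]
      simp only [List.foldl_flatMap, List.foldl_map]
      congr 1
      funext d dx
      congr 1
      funext d dy
      congr 1
      funext d dz
      by_cases h0 : dx = 0 ∧ dy = 0 ∧ dz = 0
      · obtain ⟨rfl, rfl, rfl⟩ := h0
        simp
      · rw [if_neg h0, if_pos ?_, pvShift]
        simp only [Bool.not_eq_true', beq_eq_false_iff_ne, ne_eq, Prod.mk.injEq]
        exact fun hx => h0 ⟨hx.1, hx.2.1, hx.2.2⟩
    simp only [hp]
  rw [pvStepB, ← h]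

lemma mem_pvOffs (d : Int × Int × Int) :
    d ∈ pvOffs ↔ (|d.1| ≤ 1 ∧ |d.2.1| ≤ 1 ∧ |d.2.2| ≤ 1) ∧ d ≠ (0, 0, 0) := by
  simp [pvOffs, List.mem_filter, mem_pvDirs]

lemma nodup_pvOffs : pvOffs.Nodup := by decide

lemma pvShift_inj (p : Int × Int × Int) : Function.Injective (pvShift p) := by
  rintro ⟨a1, b1, c1⟩ ⟨a2, b2, c2⟩ h
  simp only [pvShift, Prod.mk.injEq] at h ⊢
  omega

lemma count_offs (p c : Int × Int × Int) :
    (pvOffs.map (pvShift p)).count c = if p ≠ c ∧ pvNear c p = true then 1 else 0 := by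
  obtain ⟨p1, p2, p3⟩ := p
  obtain ⟨c1, c2, c3⟩ := c
  have hnd : (pvOffs.map (pvShift (p1, p2, p3))).Nodup := nodup_pvOffs.map (pvShift_inj _)
  have hiff : (c1, c2, c3) ∈ pvOffs.map (pvShift (p1, p2, p3)) ↔
      ((p1, p2, p3) : Int × Int × Int) ≠ (c1, c2, c3) ∧ pvNear (c1, c2, c3) (p1, p2, p3) = true := by
    rw [List.mem_map]
    constructor
    · rintro ⟨⟨d1, d2, d3⟩, hd, hdc⟩
      have hb : ((-1 ≤ d1 ∧ d1 ≤ 1) ∧ (-1 ≤ d2 ∧ d2 ≤ 1) ∧ (-1 ≤ d3 ∧ d3 ≤ 1)) ∧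
          ¬(d1 = 0 ∧ d2 = 0 ∧ d3 = 0) := by
        simpa [mem_pvOffs, abs_le, Prod.ext_iff] using hd
      have hdc' : p1 + d1 = c1 ∧ p2 + d2 = c2 ∧ p3 + d3 = c3 := by
        simpa [pvShift, Prod.ext_iff] using hdc
      constructor
      · simp only [Ne, Prod.mk.injEq, not_and]
        intro h1 h2 h3
        exact hb.2 ⟨by omega, by omega, by omega⟩
      · rw [pvNear, decide_eq_true_eq]
        simp only [abs_le]
        omega
    · rintro ⟨hne, hnear⟩
      rw [pvNear, decide_eq_true_eq] at hnear
      simp only [abs_le] at hnear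
      have hne' : ¬(p1 = c1 ∧ p2 = c2 ∧ p3 = c3) := by
        simpa [Prod.ext_iff] using hne
      refine ⟨(c1 - p1, c2 - p2, c3 - p3), ?_, ?_⟩
      · rw [mem_pvOffs]
        simp only [abs_le, Ne, Prod.mk.injEq, not_and]
        constructor
        · exact ⟨by omega, by omega, by omega⟩
        · intro h1 h2 h3
          exact hne' ⟨by omega, by omega, by omega⟩
      · simp only [pvShift, Prod.mk.injEq]
        omega
  by_cases hc : (c1, c2, c3) ∈ pvOffs.map (pvShift (p1, p2, p3))
  · rw [if_pos (hiff.1 hc), List.count_eq_one_of_mem hnd hc]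
  · rw [if_neg (fun hx => hc (hiff.2 hx)), List.count_eq_zero.2 hc]

lemma count_pvKeys (active : List (Int × Int × Int)) (c : Int × Int × Int) :
    (pvKeys active).count c = pvNbr active c := by
  induction active with
  | nil => simp [pvKeys, pvNbr]
  | cons p t ih =>
    rw [pvKeys, List.flatMap_cons, List.count_append]
    rw [pvKeys] at ih
    rw [ih, count_offs]
    simp only [pvNbr, List.countP_cons]
    by_cases hp : p = c
    · subst hp
      simp
    · by_cases hn : pvNear c p = true
      · rw [if_pos ⟨hp, hn⟩]
        simp [hp, hn]
        omega
      · have hn' : pvNear c p = false := by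
          simpa using hn
        rw [if_neg (fun hx => hn hx.2)]
        simp [hp, hn']

lemma getD_pvCounts (active : List (Int × Int × Int)) (c : Int × Int × Int) :
    (pvCounts active).getD c 0 = (pvNbr active c : Int) := by
  rw [pvCounts, PySem.Dict.getD_foldl_insert_add_one, count_pvKeys]
  have : (PySem.Dict.empty : PySem.Dict (Int × Int × Int) Int).getD c 0 = 0 := rfl
  rw [this]
  omega

lemma keys_pvCounts (active : List (Int × Int × Int)) :
    (pvCounts active).keys = PySem.Set.ofList (pvKeys active) := by
  rw [pvCounts, PySem.Dict.keys_foldl_insert]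
  rfl

lemma nodup_keys_pvCounts (active : List (Int × Int × Int)) :
    (pvCounts active).keys.Nodup := by
  rw [keys_pvCounts]
  exact PySem.Set.nodup_ofList _

lemma selFold_spec (active : List (Int × Int × Int)) :
    ∀ (l : List ((Int × Int × Int) × Int)) (s : List (Int × Int × Int)), s.Nodup →
      ((l.foldl (fun s kn =>
          if kn.2 = 3 ∨ (kn.2 = 2 ∧ PySem.Set.contains active kn.1) then PySem.Set.add s kn.1
          else s) s).Nodup ∧
        ∀ c, c ∈ l.foldl (fun s kn =>
          if kn.2 = 3 ∨ (kn.2 = 2 ∧ PySem.Set.contains active kn.1) then PySem.Set.add s kn.1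
          else s) s ↔
          (c ∈ s ∨ ∃ n, (c, n) ∈ l ∧ (n = 3 ∨ (n = 2 ∧ PySem.Set.contains active c = true)))) := by
  intro l
  induction l with
  | nil => intro s hs; simp [hs]
  | cons kn l ih =>
    intro s hs
    rw [List.foldl_cons]
    by_cases hcond : kn.2 = 3 ∨ (kn.2 = 2 ∧ PySem.Set.contains active kn.1 = true)
    · rw [if_pos hcond]
      obtain ⟨rn, rm⟩ := ih (PySem.Set.add s kn.1) (PySem.Set.nodup_add s kn.1 hs)
      refine ⟨rn, fun c => (rm c).trans ?_⟩
      rw [PySem.Set.mem_add]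
      constructor
      · rintro ((hin | rfl) | ⟨n, hn, hc⟩)
        · exact Or.inl hin
        · exact Or.inr ⟨kn.2, List.mem_cons_self .., hcond⟩
        · exact Or.inr ⟨n, List.mem_cons_of_mem kn hn, hc⟩
      · rintro (hin | ⟨n, hn, hc⟩)
        · exact Or.inl (Or.inl hin)
        · rcases List.mem_cons.1 hn with heq | hn
          · exact Or.inl (Or.inr (congrArg Prod.fst heq))
          · exact Or.inr ⟨n, hn, hc⟩
    · rw [if_neg hcond]
      obtain ⟨rn, rm⟩ := ih s hs
      refine ⟨rn, fun c => (rm c).trans ?_⟩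
      constructor
      · rintro (hin | ⟨n, hn, hc⟩)
        · exact Or.inl hin
        · exact Or.inr ⟨n, List.mem_cons_of_mem kn hn, hc⟩
      · rintro (hin | ⟨n, hn, hc⟩)
        · exact Or.inl hin
        · rcases List.mem_cons.1 hn with heq | hn
          · exfalso
            apply hcond
            have h2 : kn.2 = n := (congrArg Prod.snd heq.symm)
            have h1 : kn.1 = c := (congrArg Prod.fst heq.symm)
            rw [h2, h1]
            exact hc
          · exact Or.inr ⟨n, hn, hc⟩

lemma stepB_spec (active : List (Int × Int × Int)) :
    (pvStepB active).Nodup ∧ ∀ c, c ∈ pvStepB active ↔ pvRule active c := by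
  rw [stepB_eq_counts]
  obtain ⟨rn, rm⟩ := selFold_spec active (pvCounts active).items PySem.Set.empty List.nodup_nil
  refine ⟨rn, fun c => ?_⟩
  rw [rm c]
  have hitems : (pvCounts active).items =
      (pvCounts active).keys.map (fun k => (k, (pvCounts active).getD k 0)) :=
    PySem.Dict.items_eq_map_keys _ (nodup_keys_pvCounts active) 0
  rw [hitems]
  have hmemnil : ¬ c ∈ (PySem.Set.empty : PySem.Set (Int × Int × Int)) := by
    simp [PySem.Set.empty]
  simp only [hmemnil, false_or]
  constructor
  · rintro ⟨n, hn, hc⟩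
    obtain ⟨k, hk, hkc⟩ := List.mem_map.1 hn
    obtain ⟨rfl, rfl⟩ : k = c ∧ (pvCounts active).getD k 0 = n := by
      constructor
      · exact (congrArg Prod.fst hkc)
      · exact (congrArg Prod.snd hkc)
    rw [getD_pvCounts] at hc
    rw [pvRule]
    rcases hc with h3 | ⟨h2, hin⟩
    · left; exact_mod_cast h3
    · right
      exact ⟨by exact_mod_cast h2, (PySem.Set.contains_iff _ _).1 hin⟩
  · intro hr
    have hkmem : c ∈ (pvCounts active).keys := by
      rw [keys_pvCounts, PySem.Set.mem_ofList]
      have hpos : 0 < (pvKeys active).count c := by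
        rw [count_pvKeys]
        rcases hr with h3 | ⟨h2, _⟩ <;> omega
      exact List.count_pos_iff.1 hpos
    refine ⟨(pvCounts active).getD c 0, List.mem_map.2 ⟨c, hkmem, rfl⟩, ?_⟩
    rw [getD_pvCounts]
    rcases hr with h3 | ⟨h2, hin⟩
    · left; exact_mod_cast h3
    · right
      exact ⟨by exact_mod_cast h2, (PySem.Set.contains_iff _ _).2 hin⟩

lemma pvRule_congr (l1 l2 : List (Int × Int × Int)) (h1 : l1.Nodup) (h2 : l2.Nodup)
    (hm : ∀ c, c ∈ l1 ↔ c ∈ l2) (c : Int × Int × Int) : pvRule l1 c ↔ pvRule l2 c := by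
  have hp : l1.Perm l2 := (List.perm_ext_iff_of_nodup h1 h2).2 hm
  rw [pvRule, pvRule, pvNbr, pvNbr, hp.countP_eq]
  rw [hm c]

lemma iterate_inv (n : Nat) :
    ∀ (l1 l2 : List (Int × Int × Int)), l1.Nodup → l2.Nodup → (∀ c, c ∈ l1 ↔ c ∈ l2) →
      (((List.range n).foldl (fun currState _ => pvStepA currState) l1).Nodup ∧
       ((List.range n).foldl (fun active _ => pvStepB active) l2).Nodup ∧
       (∀ c, c ∈ (List.range n).foldl (fun currState _ => pvStepA currState) l1 ↔
             c ∈ (List.range n).foldl (fun active _ => pvStepB active) l2)) := by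
  induction n with
  | zero =>
    intro l1 l2 h1 h2 hm
    simp only [List.range_zero, List.foldl_nil]
    exact ⟨h1, h2, hm⟩
  | succ n ih =>
    intro l1 l2 h1 h2 hm
    obtain ⟨r1, r2, rm⟩ := ih l1 l2 h1 h2 hm
    rw [List.range_succ, List.foldl_append, List.foldl_append]
    simp only [List.foldl_cons, List.foldl_nil]
    obtain ⟨sa, sma⟩ := stepA_spec _ r1
    obtain ⟨sb, smb⟩ := stepB_spec (((List.range n).foldl (fun active _ => pvStepB active) l2))
    refine ⟨sa, sb, fun c => ?_⟩
    rw [sma c, smb c]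
    exact pvRule_congr _ _ r1 r2 rm c

-- ===== VERDICT (by name: the statement is the Claim_ definition above) =====
theorem part1_spec : Claim_equal_part1 := by
  intro state _hdom hpre
  unfold Spec_part1 part1 part1_alt
  unfold Pre_part1 at hpre
  obtain ⟨r1, r2, rm⟩ := iterate_inv 6 state (PySem.Set.ofList state) hpre
    (PySem.Set.nodup_ofList state)
    (fun c => (PySem.Set.mem_ofList state c).symm)
  have hperm := (List.perm_ext_iff_of_nodup r1 r2).2 rm
  rw [hperm.length_eq]
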